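-- pv_equiv track=rewrite | github.com/vinares/Leet | DP/1713.Subsequence/DP.py | minOperations
-- ===== SOURCE A (Python) =====
-- def minOperations(target: list, arr: list) -> int:
--     infinity = 10 ** 6
--     target_hash = dict()
--     arr_hash = dict()
--     for i, tar in enumerate(target):
--         target_hash[tar] = i
--
--     new_arr = []
--     for x in arr:
--         if x in target_hash.keys():
--             new_arr.append(target_hash[x])
--
--     dp = [1] * len(new_arr)
--     for i in range(1, len(new_arr)):
--         for j in range(i):
--             if new_arr[i] > new_arr[j]:
--                 dp[i] = max(dp[i], dp[j] + 1)
--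
--
--     return len(target) - max(dp) if dp else len(target)
--
-- target = [1,3,8]
--
-- arr = [2,6]
-- ===== SOURCE B (Python) =====
-- def minOperations(target: list, arr: list) -> int:
--     # Patience-sorting LIS on target-indices (O(m log m)) instead of A's O(m^2) DP.
--     pos = {v: i for i, v in enumerate(target)}
--     tails = []
--     for x in arr:
--         t = pos.get(x)
--         if t is not None:
--             # bisect_left(tails, t), hand-written (A imports nothing)
--             lo, hi = 0, len(tails)
--             while lo < hi:
--                 mid = (lo + hi) // 2
--                 if tails[mid] < t:
--                     lo = mid + 1
--                 else:
--                     hi = mid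
--             if lo == len(tails):
--                 tails.append(t)
--             else:
--                 tails[lo] = t
--     return len(target) - len(tails)
-- ===== Notes on version B (the rewrite author's own statement) =====
-- stated objective: faster
-- what changed: Replaces the O(m^2) longest-increasing-subsequence DP over the mapped indices by patience sorting: a single pass that maintains the sorted list of minimal tails and places each element with binary search.
import Mathlib
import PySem

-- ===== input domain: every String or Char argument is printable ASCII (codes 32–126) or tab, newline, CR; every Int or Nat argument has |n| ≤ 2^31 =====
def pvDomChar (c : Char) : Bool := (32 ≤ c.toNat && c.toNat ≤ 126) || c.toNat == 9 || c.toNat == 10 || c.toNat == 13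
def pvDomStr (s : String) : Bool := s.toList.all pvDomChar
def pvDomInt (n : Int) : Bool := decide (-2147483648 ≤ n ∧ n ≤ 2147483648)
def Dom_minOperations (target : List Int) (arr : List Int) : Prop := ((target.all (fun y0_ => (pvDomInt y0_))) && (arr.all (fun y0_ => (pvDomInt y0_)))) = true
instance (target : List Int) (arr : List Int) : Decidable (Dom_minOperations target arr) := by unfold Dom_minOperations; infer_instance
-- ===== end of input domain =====

-- B replaces A's O(m^2) longest-increasing-subsequence DP on the mapped target-indices by
-- patience sorting (one pass with a binary-searched tails list); same return value.

-- ===== PORT A =====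
-- 'target_hash[tar] = i' over enumerate(target): later duplicates overwrite.
def pvHash (target : List Int) : PySem.Dict Int Int :=
  (PySem.List.enumerate target 0).foldl (fun d p => d.insert p.2 p.1) (PySem.Dict.mk [])

def minOperations (target : List Int) (arr : List Int) : Int :=
  let _infinity : Int := 10 ^ 6   -- A's unused 'infinity = 10 ** 6'
  let targetHash := pvHash target
  let newArr : List Int :=
    arr.foldl (fun acc x =>
      if targetHash.contains x then acc ++ [targetHash.getD x 0] else acc) []
  -- dp = [1]*len(new_arr); the two nested index loops. Loop indices come from pyRange, so they
  -- are nonnegative and in range: pyGetD / .toNat are exact for dp[j], dp[i] and the assignment.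
  let dp : List Int :=
    (PySem.List.pyRange 1 (newArr.length : Int) 1).foldl (fun dp i =>
      (PySem.List.pyRange 0 i 1).foldl (fun dp j =>
        if PySem.List.pyGetD newArr i 0 > PySem.List.pyGetD newArr j 0 then
          dp.set i.toNat (max (PySem.List.pyGetD dp i 0) (PySem.List.pyGetD dp j 0 + 1))
        else dp) dp) (List.replicate newArr.length (1 : Int))
  -- 'return len(target) - max(dp) if dp else len(target)'
  match PySem.List.max? dp (fun y => y) with
  | some m => (target.length : Int) - m
  | none => (target.length : Int)

-- ===== PORT B =====
-- place one mapped index into the tails list: Source B's hand-written bisect_left while-loop is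
-- exactly PySem.List.bisectLeft's binary-search loop, then replace-or-append.
def altStep (tails : List Int) (t : Int) : List Int :=
  let lo := PySem.List.bisectLeft tails t
  if lo = tails.length then tails ++ [t] else tails.set lo t

def minOperations_alt (target : List Int) (arr : List Int) : Int :=
  let pos := pvHash target   -- {v: i for i, v in enumerate(target)}
  let tails : List Int :=
    arr.foldl (fun tails x =>
      match pos.get? x with
      | some t => altStep tails t
      | none => tails) []
  (target.length : Int) - (tails.length : Int)

-- ===== PRECONDITION & SPEC =====
def Spec_minOperations (target : List Int) (arr : List Int) (out : Int) : Prop := out = minOperations_alt target arr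
instance (target : List Int) (arr : List Int) (out : Int) : Decidable (Spec_minOperations target arr out) := by unfold Spec_minOperations; infer_instance

-- ===== CLAIM (what is proved, stated in full; the proofs are below) =====
def Claim_equal_minOperations : Prop := ∀ (target : List Int) (arr : List Int), Dom_minOperations target arr → Spec_minOperations target arr (minOperations target arr)

-- ===== LEMMAS AND PROOFS =====
def dbelow (ps : List (Int × Int)) (x : Int) : Int :=
  ps.foldl (fun m p => if p.1 < x then max m p.2 else m) 0

theorem dbfold_mono (x : Int) : ∀ (ps : List (Int × Int)) (a : Int),
    a ≤ ps.foldl (fun m p => if p.1 < x then max m p.2 else m) a := by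
  intro ps
  induction ps with
  | nil => intro a; simp
  | cons p t ih =>
    intro a
    simp only [List.foldl_cons]
    split
    · exact le_trans (le_max_left _ _) (ih _)
    · exact ih a

theorem dbelow_nonneg (ps : List (Int × Int)) (x : Int) : 0 ≤ dbelow ps x := dbfold_mono x ps 0

theorem dbfold_ge (x : Int) (p : Int × Int) (hlt : p.1 < x) : ∀ (ps : List (Int × Int)) (a : Int),
    p ∈ ps → p.2 ≤ ps.foldl (fun m p => if p.1 < x then max m p.2 else m) a := by
  intro ps
  induction ps with
  | nil => intro a h; simp at h
  | cons q t ih =>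
    intro a h
    rcases List.mem_cons.1 h with h | h
    · subst h
      simp only [List.foldl_cons, if_pos hlt]
      exact le_trans (le_max_right _ _) (dbfold_mono x t _)
    · simp only [List.foldl_cons]
      exact ih _ h

theorem dbelow_ge (ps : List (Int × Int)) (x : Int) (p : Int × Int) (hp : p ∈ ps)
    (hlt : p.1 < x) : p.2 ≤ dbelow ps x := dbfold_ge x p hlt ps 0 hp

theorem dbfold_attained (x : Int) : ∀ (ps : List (Int × Int)) (a : Int),
    ps.foldl (fun m p => if p.1 < x then max m p.2 else m) a = a
      ∨ ∃ p ∈ ps, p.1 < x ∧ p.2 = ps.foldl (fun m p => if p.1 < x then max m p.2 else m) a := by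
  intro ps
  induction ps with
  | nil => intro a; left; simp
  | cons q t ih =>
    intro a
    simp only [List.foldl_cons]
    by_cases hq : q.1 < x
    · rw [if_pos hq]
      rcases ih (max a q.2) with h | ⟨p, hp, hx, he⟩
      · rw [h]
        rcases max_choice a q.2 with h2 | h2
        · left; exact h2
        · right; exact ⟨q, List.mem_cons_self, hq, h2.symm⟩
      · right; exact ⟨p, List.mem_cons_of_mem _ hp, hx, he⟩
    · rw [if_neg hq]
      rcases ih a with h | ⟨p, hp, hx, he⟩
      · left; exact h
      · right; exact ⟨p, List.mem_cons_of_mem _ hp, hx, he⟩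

theorem dbelow_attained (ps : List (Int × Int)) (x : Int) (h : 1 ≤ dbelow ps x) :
    ∃ p ∈ ps, p.1 < x ∧ p.2 = dbelow ps x := by
  rcases dbfold_attained x ps 0 with h0 | h0
  · unfold dbelow at h; omega
  · exact h0

def dval (ps : List (Int × Int)) (x : Int) : Int := 1 + dbelow ps x
def statesF (l : List Int) : List (Int × Int) :=
  l.foldl (fun ps x => ps ++ [(x, dval ps x)]) []
def maxval (ps : List (Int × Int)) : Int := ps.foldl (fun m p => max m p.2) 0

theorem maxval_append (ps : List (Int × Int)) (p : Int × Int) :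
    maxval (ps ++ [p]) = max (maxval ps) p.2 := by
  simp [maxval, List.foldl_append]

theorem le_maxval (ps : List (Int × Int)) (p : Int × Int) (hp : p ∈ ps) : p.2 ≤ maxval ps :=
  (PySem.List.le_foldl_max_int ps (fun p => p.2) 0).2 p hp

theorem statesF_append (l : List Int) (x : Int) :
    statesF (l ++ [x]) = statesF l ++ [(x, dval (statesF l) x)] := by
  simp [statesF, List.foldl_append]

theorem statesF_map_fst (l : List Int) : (statesF l).map (·.1) = l := by
  induction l using List.reverseRecOn with
  | nil => simp [statesF]
  | append_singleton t x ih => rw [statesF_append, List.map_append, ih]; simp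

theorem length_statesF (l : List Int) : (statesF l).length = l.length := by
  conv_rhs => rw [← statesF_map_fst l]
  simp

theorem statesF_snd_ge_one (l : List Int) (p : Int × Int) (hp : p ∈ statesF l) : 1 ≤ p.2 := by
  induction l using List.reverseRecOn with
  | nil => simp [statesF] at hp
  | append_singleton t x ih =>
    rw [statesF_append] at hp
    rcases List.mem_append.1 hp with h | h
    · exact ih h
    · simp at h
      have := dbelow_nonneg (statesF t) x
      rw [h]
      simp only [dval]
      omega

def PvInv (ps : List (Int × Int)) (tails : List Int) : Prop :=
  ((tails.length : Int) = maxval ps)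
  ∧ (∀ i j (_ : i < tails.length) (hj : j < tails.length), i < j → tails[i]'(by omega) < tails[j])
  ∧ (∀ k (hk : k < tails.length), ∃ p ∈ ps, p.1 = tails[k] ∧ (k : Int) + 1 ≤ p.2)
  ∧ (∀ p ∈ ps, ∀ k (hk : k < tails.length), (k : Int) + 1 ≤ p.2 → tails[k] ≤ p.1)

theorem inv_step (ps : List (Int × Int)) (tails : List Int) (x : Int)
    (h : PvInv ps tails) : PvInv (ps ++ [(x, dval ps x)]) (altStep tails x) := by
  obtain ⟨hlen, hsort, hmem, hmin⟩ := h
  have hd0 : 0 ≤ dbelow ps x := dbelow_nonneg ps x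
  have F1 : ∀ j (hj : j < tails.length), (j : Int) + 1 ≤ dbelow ps x → tails[j] < x := by
    intro j hj hjd
    obtain ⟨q, hq, hqx, hqd⟩ := dbelow_attained ps x (by omega)
    have := hmin q hq j hj (by omega)
    omega
  have F2 : ∀ j (hj : j < tails.length), dbelow ps x ≤ (j : Int) → x ≤ tails[j] := by
    intro j hj hjd
    by_contra hcon
    push_neg at hcon
    obtain ⟨q, hq, hq1, hq2⟩ := hmem j hj
    have := dbelow_ge ps x q hq (by omega)
    omega
  have F3 : dbelow ps x ≤ (tails.length : Int) := by
    by_cases h1 : 1 ≤ dbelow ps x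
    · obtain ⟨q, hq, _, hqd⟩ := dbelow_attained ps x h1
      have := le_maxval ps q hq
      omega
    · omega
  have hpw : List.Pairwise (· ≤ ·) tails := by
    rw [List.pairwise_iff_getElem]
    intro i j hi hj hij
    exact le_of_lt (hsort i j hi hj hij)
  obtain ⟨hr1, hr2, hr3⟩ := PySem.List.bisectLeft_spec tails x hpw
  have hrd : (PySem.List.bisectLeft tails x : Int) = dbelow ps x := by
    set r := PySem.List.bisectLeft tails x with hrdef
    rcases lt_trichotomy (r : Int) (dbelow ps x) with hlt | heq | hgt
    · exfalso
      have hrlen : r < tails.length := by omega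
      have h1 := hr3 r hrlen (le_refl r)
      have h2 := F1 r hrlen (by omega)
      omega
    · exact heq
    · exfalso
      have hjlen : (dbelow ps x).toNat < tails.length := by omega
      have h1 := hr2 (dbelow ps x).toNat hjlen (by omega)
      have h2 := F2 (dbelow ps x).toNat hjlen (by omega)
      omega
  set r := PySem.List.bisectLeft tails x with hrdef
  have hdval : dval ps x = dbelow ps x + 1 := by simp [dval]; ring
  simp only [altStep]
  by_cases hcase : r = tails.length
  · rw [if_pos hcase]
    have hrl : (tails.length : Int) = dbelow ps x := by rw [← hcase]; exact hrd
    refine ⟨?_, ?_, ?_, ?_⟩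
    · rw [maxval_append]
      simp only [List.length_append, List.length_singleton]
      push_cast
      omega
    · intro i j hi hj hij
      simp only [List.length_append, List.length_singleton] at hi hj
      by_cases hjl : j = tails.length
      · subst hjl
        have hi' : i < tails.length := by omega
        rw [List.getElem_append_left hi', List.getElem_concat_length rfl]
        exact F1 i hi' (by omega)
      · have hj' : j < tails.length := by omega
        have hi' : i < tails.length := by omega
        rw [List.getElem_append_left hi', List.getElem_append_left hj']
        exact hsort i j hi' hj' hij
    · intro k hk
      simp only [List.length_append, List.length_singleton] at hk
      by_cases hkl : k = tails.length
      · subst hkl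
        refine ⟨(x, dval ps x), List.mem_append_right _ (List.mem_singleton_self _), ?_, ?_⟩
        · rw [List.getElem_concat_length rfl]
        · simp only [hdval]; omega
      · have hk' : k < tails.length := by omega
        obtain ⟨p, hp, h1, h2⟩ := hmem k hk'
        exact ⟨p, List.mem_append_left _ hp, by rw [List.getElem_append_left hk']; exact h1, h2⟩
    · intro p hp k hk hkd
      simp only [List.length_append, List.length_singleton] at hk
      rcases List.mem_append.1 hp with hp | hp
      · by_cases hkl : k = tails.length
        · exfalso
          have := le_maxval ps p hp
          omega
        · have hk' : k < tails.length := by omega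
          rw [List.getElem_append_left hk']
          exact hmin p hp k hk' hkd
      · simp only [List.mem_singleton] at hp
        subst hp
        by_cases hkl : k = tails.length
        · subst hkl
          rw [List.getElem_concat_length rfl]
        · have hk' : k < tails.length := by omega
          rw [List.getElem_append_left hk']
          exact le_of_lt (F1 k hk' (by omega))
  · rw [if_neg hcase]
    have hrlen : r < tails.length := by
      have := hr1; omega
    have hdle : dval ps x ≤ maxval ps := by
      simp only [hdval]; omega
    refine ⟨?_, ?_, ?_, ?_⟩
    · rw [maxval_append]
      simp only [List.length_set]
      omega
    · intro i j hi hj hij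
      simp only [List.length_set] at hi hj
      rw [List.getElem_set, List.getElem_set]
      by_cases hir : r = i
      · subst hir
        rw [if_pos rfl, if_neg (by omega)]
        have h1 := F2 r hrlen (by omega)
        have h2 := hsort r j hrlen hj hij
        omega
      · rw [if_neg hir]
        by_cases hjr : r = j
        · subst hjr
          rw [if_pos rfl]
          exact F1 i hi (by omega)
        · rw [if_neg hjr]
          exact hsort i j hi hj hij
    · intro k hk
      simp only [List.length_set] at hk
      rw [List.getElem_set]
      by_cases hkr : r = k
      · subst hkr
        rw [if_pos rfl]
        exact ⟨(x, dval ps x), List.mem_append_right _ (List.mem_singleton_self _), rfl,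
          by simp only [hdval]; omega⟩
      · rw [if_neg hkr]
        obtain ⟨p, hp, h1, h2⟩ := hmem k hk
        exact ⟨p, List.mem_append_left _ hp, h1, h2⟩
    · intro p hp k hk hkd
      simp only [List.length_set] at hk
      rw [List.getElem_set]
      rcases List.mem_append.1 hp with hp | hp
      · by_cases hkr : r = k
        · subst hkr
          rw [if_pos rfl]
          by_contra hcon
          push_neg at hcon
          have := dbelow_ge ps x p hp (by omega)
          omega
        · rw [if_neg hkr]
          exact hmin p hp k hk hkd
      · simp only [List.mem_singleton] at hp
        subst hp
        by_cases hkr : r = k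
        · subst hkr
          rw [if_pos rfl]
        · rw [if_neg hkr]
          simp only [hdval] at hkd
          exact le_of_lt (F1 k hk (by omega))

theorem inv_main (l : List Int) : PvInv (statesF l) (l.foldl altStep []) := by
  induction l using List.reverseRecOn with
  | nil =>
    refine ⟨by simp [maxval, statesF], ?_, ?_, ?_⟩
    · intro i j hi hj hij; simp at hj
    · intro k hk; simp at hk
    · intro p hp; simp [statesF] at hp
  | append_singleton t x ih =>
    rw [statesF_append, List.foldl_append, List.foldl_cons, List.foldl_nil]
    exact inv_step _ _ _ ih

def dmap (l : List Int) : List Int := (statesF l).map (·.2)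

theorem take_succ_concat (l : List Int) (m : Nat) (h : m < l.length) :
    l.take (m+1) = l.take m ++ [l[m]] := by
  rw [List.take_add_one, List.getElem?_eq_getElem h]
  rfl

theorem length_dmap_take (l : List Int) (m : Nat) (h : m ≤ l.length) :
    (dmap (l.take m)).length = m := by
  simp [dmap, length_statesF, h]

theorem foldl_set_read (C : Int → Prop) [DecidablePred C] (g : Int → Int) (iN : Nat) :
    ∀ (js : List Int) (dp : List Int), iN < dp.length → (∀ j ∈ js, 0 ≤ j ∧ j.toNat ≠ iN) →
    js.foldl (fun dp j => if C j then
        dp.set iN (max (PySem.List.pyGetD dp (iN : Int) 0) (g (PySem.List.pyGetD dp j 0)))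
      else dp) dp
    = dp.set iN (js.foldl (fun a j => if C j then max a (g (PySem.List.pyGetD dp j 0)) else a)
        (PySem.List.pyGetD dp (iN : Int) 0)) := by
  intro js
  induction js with
  | nil =>
    intro dp hlen _
    simp only [List.foldl_nil]
    exact (List.set_getElem_self (by omega)).symm |>.trans (by
      rw [PySem.List.pyGetD_natCast, List.getD_eq_getElem?_getD, List.getElem?_eq_getElem hlen]
      rfl)
  | cons j js ih =>
    intro dp hlen hjs
    obtain ⟨hj0, hjne⟩ := hjs j List.mem_cons_self
    simp only [List.foldl_cons]
    by_cases hC : C j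
    · rw [if_pos hC, if_pos hC]
      set v := max (PySem.List.pyGetD dp (iN : Int) 0) (g (PySem.List.pyGetD dp j 0)) with hv
      have hlen' : iN < (dp.set iN v).length := by simpa using hlen
      rw [ih (dp.set iN v) hlen' (fun j hj => hjs j (List.mem_cons_of_mem _ hj))]
      rw [List.set_set]
      have hvv : PySem.List.pyGetD (dp.set iN v) (iN : Int) 0 = v := by
        rw [PySem.List.pyGetD_natCast]
        simp [List.getD_eq_getElem?_getD, hlen]
      rw [hvv]
      congr 1
      apply PySem.List.foldl_congr_mem
      intro acc j' hj'
      obtain ⟨hj0', hjne'⟩ := hjs j' (List.mem_cons_of_mem _ hj')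
      have hcast : j' = ((j'.toNat : Nat) : Int) := (Int.toNat_of_nonneg hj0').symm
      rw [hcast, PySem.List.pyGetD_natCast, PySem.List.pyGetD_natCast]
      have : (dp.set iN v).getD j'.toNat 0 = dp.getD j'.toNat 0 := by
        simp [List.getD_eq_getElem?_getD, List.getElem?_set_ne (fun h => hjne' h.symm)]
      rw [this]
    · rw [if_neg hC, if_neg hC]
      exact ih dp hlen (fun j hj => hjs j (List.mem_cons_of_mem _ hj))

theorem foldl_max_plus (x : Int) : ∀ (ps : List (Int × Int)) (a : Int),
    ps.foldl (fun acc p => if p.1 < x then max acc (p.2 + 1) else acc) (1 + a)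
    = 1 + ps.foldl (fun m p => if p.1 < x then max m p.2 else m) a := by
  intro ps
  induction ps with
  | nil => intro a; simp
  | cons p t ih =>
    intro a
    simp only [List.foldl_cons]
    by_cases hp : p.1 < x
    · rw [if_pos hp, if_pos hp]
      have : max (1 + a) (p.2 + 1) = 1 + max a p.2 := by omega
      rw [this, ih]
    · rw [if_neg hp, if_neg hp]
      exact ih a

theorem dmap_append (t : List Int) (x : Int) :
    dmap (t ++ [x]) = dmap t ++ [dval (statesF t) x] := by
  rw [dmap, statesF_append, List.map_append]
  rfl

theorem foldl_max_plus0 (x : Int) (ps : List (Int × Int)) :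
    ps.foldl (fun acc p => if p.1 < x then max acc (p.2 + 1) else acc) 1
    = 1 + dbelow ps x := by
  have h := foldl_max_plus x ps 0
  norm_num at h
  simpa [dbelow] using h

theorem inner_eq (l : List Int) (m : Nat) (hm : m < l.length) :
    (PySem.List.pyRange 0 (m : Int) 1).foldl (fun dp j =>
      if PySem.List.pyGetD l (m : Int) 0 > PySem.List.pyGetD l j 0 then
        dp.set ((m : Int)).toNat
          (max (PySem.List.pyGetD dp (m : Int) 0) (PySem.List.pyGetD dp j 0 + 1))
      else dp) (dmap (l.take m) ++ List.replicate (l.length - m) 1)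
    = dmap (l.take (m+1)) ++ List.replicate (l.length - (m+1)) 1 := by
  set ps := statesF (l.take m) with hps
  set dpm := dmap (l.take m) ++ List.replicate (l.length - m) 1 with hdpm
  have hlenA : (dmap (l.take m)).length = m := length_dmap_take l m (le_of_lt hm)
  have hpslen : ps.length = m := by
    rw [hps, length_statesF, List.length_take]; omega
  have hlen : m < dpm.length := by
    rw [hdpm]; simp only [List.length_append, List.length_replicate, hlenA]; omega
  have htn : ((m : Int)).toNat = m := Int.toNat_natCast m
  rw [htn]
  rw [foldl_set_read (fun j => PySem.List.pyGetD l (m : Int) 0 > PySem.List.pyGetD l j 0)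
        (fun v => v + 1) m (PySem.List.pyRange 0 (m : Int) 1) dpm hlen ?side]
  case side =>
    intro j hj
    rw [PySem.List.mem_pyRange_one] at hj
    constructor
    · exact hj.1
    · omega
  have hacc : PySem.List.pyGetD dpm (m : Int) 0 = 1 := by
    rw [PySem.List.pyGetD_natCast, hdpm, List.getD_eq_getElem?_getD,
        List.getElem?_append_right (by omega), hlenA]
    simp only [Nat.sub_self, List.getElem?_replicate]
    rw [if_pos (by omega)]
    rfl
  rw [hacc]
  have hcongr :
      (PySem.List.pyRange 0 (m : Int) 1).foldl
        (fun a j => if PySem.List.pyGetD l (m : Int) 0 > PySem.List.pyGetD l j 0 then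
            max a (PySem.List.pyGetD dpm j 0 + 1) else a) 1
      = (PySem.List.pyRange 0 ((ps.length : Nat) : Int) 1).foldl
        (fun a j => (fun acc p => if p.1 < PySem.List.pyGetD l (m : Int) 0 then
            max acc (p.2 + 1) else acc) a (PySem.List.pyGetD ps j ((0:Int), (0:Int)))) 1 := by
    rw [hpslen]
    apply PySem.List.foldl_congr_mem
    intro acc j hj
    rw [PySem.List.mem_pyRange_one] at hj
    obtain ⟨hj0, hjm⟩ := hj
    have hcast : j = ((j.toNat : Nat) : Int) := (Int.toNat_of_nonneg hj0).symm
    have hjN : j.toNat < m := by omega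
    rw [hcast, PySem.List.pyGetD_natCast, PySem.List.pyGetD_natCast, PySem.List.pyGetD_natCast]
    have hjps : j.toNat < ps.length := by omega
    have hjl : j.toNat < l.length := by omega
    have hjt : j.toNat < (l.take m).length := by simp [List.length_take]; omega
    have hfst : (ps.getD j.toNat ((0:Int),(0:Int))).1 = l.getD j.toNat 0 := by
      have h1 : (l.take m)[j.toNat]? = ps[j.toNat]?.map (·.1) := by
        conv_lhs => rw [← statesF_map_fst (l.take m)]
        rw [List.getElem?_map, ← hps]
      rw [List.getElem?_eq_getElem hjps, List.getElem?_eq_getElem hjt] at h1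
      simp only [Option.map_some, Option.some.injEq] at h1
      rw [List.getD_eq_getElem?_getD, List.getD_eq_getElem?_getD,
          List.getElem?_eq_getElem hjps, List.getElem?_eq_getElem hjl]
      simp only [Option.getD_some]
      rw [← h1, List.getElem_take]
    have hsnd : (ps.getD j.toNat ((0:Int),(0:Int))).2 = dpm.getD j.toNat 0 := by
      rw [hdpm, List.getD_eq_getElem?_getD (l := dmap (l.take m) ++ _), List.getD_eq_getElem?_getD,
          List.getElem?_append_left (by omega), List.getElem?_eq_getElem hjps]
      have hjd : j.toNat < (dmap (l.take m)).length := by omega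
      rw [List.getElem?_eq_getElem hjd]
      simp only [Option.getD_some]
      show _ = (dmap (l.take m))[j.toNat]
      simp [dmap, ← hps]
    simp only [PySem.List.pyGetD_natCast, hfst, hsnd, gt_iff_lt]
  rw [hcongr, PySem.List.foldl_pyRange_zero_pyGetD' ps ((0:Int),(0:Int))
      (fun acc p => if p.1 < PySem.List.pyGetD l (m : Int) 0 then max acc (p.2 + 1) else acc) 1]
  rw [foldl_max_plus0 (PySem.List.pyGetD l (m : Int) 0) ps]
  have hx : PySem.List.pyGetD l (m : Int) 0 = l[m] := by
    rw [PySem.List.pyGetD_natCast, List.getD_eq_getElem?_getD, List.getElem?_eq_getElem hm]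
    rfl
  rw [take_succ_concat l m hm]
  show dpm.set m (1 + dbelow ps (PySem.List.pyGetD l (m : Int) 0)) = _
  rw [hdpm, List.set_append, if_neg (by omega), hlenA, Nat.sub_self]
  have hrep : l.length - m = (l.length - (m + 1)) + 1 := by omega
  rw [hrep, List.replicate_succ, List.set_cons_zero]
  rw [dmap_append, ← hps, hx]
  simp [dval]

theorem outer_eq (l : List Int) : ∀ m : Nat, 1 ≤ m → m ≤ l.length →
    (PySem.List.pyRange 1 (m : Int) 1).foldl (fun dp i =>
      (PySem.List.pyRange 0 i 1).foldl (fun dp j =>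
        if PySem.List.pyGetD l i 0 > PySem.List.pyGetD l j 0 then
          dp.set i.toNat (max (PySem.List.pyGetD dp i 0) (PySem.List.pyGetD dp j 0 + 1))
        else dp) dp) (List.replicate l.length (1 : Int))
    = dmap (l.take m) ++ List.replicate (l.length - m) 1 := by
  intro m
  induction m with
  | zero => intro h; exact absurd h (by omega)
  | succ m ih =>
    intro _ hle
    by_cases hm1 : m = 0
    · subst hm1
      rw [PySem.List.pyRange_one_eq_nil (by norm_num), List.foldl_nil]
      have h0 : 0 < l.length := by omega
      have ht1 : l.take 1 = [l[0]] := by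
        rw [take_succ_concat l 0 h0]
        rfl
      rw [ht1, show ([l[0]] : List Int) = [] ++ [l[0]] by rfl, dmap_append]
      have : dval (statesF []) l[0] = 1 := by
        simp [dval, dbelow, statesF]
      rw [this]
      have hrep : l.length = (l.length - 1) + 1 := by omega
      conv_lhs => rw [hrep, List.replicate_succ]
      simp [dmap, statesF]
    · have hm : 1 ≤ m := by omega
      have hcast : ((m + 1 : Nat) : Int) = (m : Int) + 1 := by push_cast; ring
      rw [hcast, PySem.List.pyRange_one_succ_right (by exact_mod_cast hm), List.foldl_append,
          List.foldl_cons, List.foldl_nil, ih hm (by omega)]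
      exact inner_eq l m (by omega)

theorem dpA_eq (l : List Int) :
    (PySem.List.pyRange 1 (l.length : Int) 1).foldl (fun dp i =>
      (PySem.List.pyRange 0 i 1).foldl (fun dp j =>
        if PySem.List.pyGetD l i 0 > PySem.List.pyGetD l j 0 then
          dp.set i.toNat (max (PySem.List.pyGetD dp i 0) (PySem.List.pyGetD dp j 0 + 1))
        else dp) dp) (List.replicate l.length (1 : Int)) = dmap l := by
  by_cases hl : l.length = 0
  · rw [hl]
    rw [PySem.List.pyRange_one_eq_nil (by norm_num), List.foldl_nil]
    rw [List.length_eq_zero_iff] at hl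
    subst hl
    simp [dmap, statesF]
  · rw [outer_eq l l.length (by omega) (le_refl _), List.take_length, Nat.sub_self]
    simp

theorem newArr_eq (h : PySem.Dict Int Int) : ∀ (arr : List Int) (acc : List Int),
    arr.foldl (fun acc x => if h.contains x then acc ++ [h.getD x 0] else acc) acc
      = acc ++ arr.filterMap h.get? := by
  intro arr
  induction arr with
  | nil => intro acc; simp
  | cons x t ih =>
    intro acc
    rw [List.foldl_cons, List.filterMap_cons]
    by_cases hc : h.contains x
    · rw [if_pos hc]
      have hs : (h.get? x).isSome := by rw [← PySem.Dict.contains_eq_isSome_get?, hc]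
      obtain ⟨v, hv⟩ := Option.isSome_iff_exists.1 hs
      rw [hv, ih]
      rw [PySem.Dict.getD_eq_get?_getD, hv]
      simp
    · rw [if_neg hc]
      have hcf : h.contains x = false := by simpa using hc
      have hs : (h.get? x).isSome = false := by
        rw [← PySem.Dict.contains_eq_isSome_get?, hcf]
      have hn : h.get? x = none := by
        rcases ho : h.get? x with _ | v
        · rfl
        · rw [ho] at hs; simp at hs
      rw [hn, ih]

theorem newArr_eq_nil (h : PySem.Dict Int Int) (arr : List Int) :
    arr.foldl (fun acc x => if h.contains x then acc ++ [h.getD x 0] else acc) []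
      = arr.filterMap h.get? := by
  rw [newArr_eq h arr []]
  exact List.nil_append _

theorem altFold_eq (h : PySem.Dict Int Int) : ∀ (arr : List Int) (t0 : List Int),
    arr.foldl (fun tails x => match h.get? x with
      | some t => altStep tails t
      | none => tails) t0
      = (arr.filterMap h.get?).foldl altStep t0 := by
  intro arr
  induction arr with
  | nil => intro t0; simp
  | cons x t ih =>
    intro t0
    rw [List.foldl_cons, List.filterMap_cons]
    rcases ho : h.get? x with _ | v
    · simp only [ih]
    · simp only [ih, List.foldl_cons]

theorem maxval_eq_match (l : List Int) (L : Int) :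
    (match PySem.List.max? (dmap l) (fun y => y) with
      | some m => L - m
      | none => L) = L - maxval (statesF l) := by
  by_cases hl : l = []
  · subst hl
    have : dmap ([] : List Int) = [] := by simp [dmap, statesF]
    rw [this]
    have h2 : PySem.List.max? ([] : List Int) (fun y => y) = none := by
      rw [PySem.List.max?_eq_none_iff]
    rw [h2]
    simp [maxval, statesF]
  · have hne : dmap l ≠ [] := by
      intro hcon
      have := congrArg List.length hcon
      simp only [dmap, List.length_map, length_statesF] at this
      exact hl (List.length_eq_zero_iff.1 this)
    obtain ⟨v, t, hvt⟩ := List.exists_cons_of_ne_nil hne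
    rw [hvt, PySem.List.max?_id_cons]
    have hv1 : 1 ≤ v := by
      have hmem : v ∈ dmap l := by rw [hvt]; exact List.mem_cons_self
      obtain ⟨p, hp, hpv⟩ := List.mem_map.1 hmem
      have := statesF_snd_ge_one l p hp
      omega
    have hfold : t.foldl max v = maxval (statesF l) := by
      have h1 : maxval (statesF l) = (dmap l).foldl max 0 := by
        rw [maxval, dmap, List.foldl_map]
      rw [h1, hvt, List.foldl_cons]
      have : max 0 v = v := by omega
      rw [this]
    rw [hfold]

-- ===== VERDICT (by name: the statement is the Claim_ definition above) =====
theorem minOperations_spec : Claim_equal_minOperations := by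
  unfold Claim_equal_minOperations
  intro target arr _
  show minOperations target arr = minOperations_alt target arr
  simp only [minOperations, minOperations_alt]
  rw [newArr_eq_nil, altFold_eq]
  set l := arr.filterMap (pvHash target).get? with hl
  rw [dpA_eq l, maxval_eq_match l ((target.length : Int)), ← (inv_main l).1]
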